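-- pv_equiv track=rewrite | github.com/moisesocosta/Codigos | Faculdade/Lógica/TrabalhoDeLogica2Q1.py | veriSub
-- ===== SOURCE A (Python) =====
-- def veriRepe(a, sub):
--     if a not in sub:
--         return sub.append(a)
--     else:
--         return sub
--
-- def veriSub(a):
--     sub = []
--     i = 0
--
--     while i < len(a):
--
--         if a[i].isalpha():
--             veriRepe(a[i], sub)
--
--         if a[i] == "-":
--             if a[i+1].isalpha():
--                 veriRepe(a[i]+a[i+1], sub)
--
--             if a[i+1] == "(":
--
--                 j = i+2
--                 aux = 1
--                 while j < len(a):
--                     if a[j] == "(":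
--                         aux += 1
--                     if a[j] == ")":
--                         aux -= 1
--                     if aux == 0:
--                         aux = j
--                         j = len(a)
--
--                     j += 1
--
--                 veriRepe(a[i:aux+1], sub)
--
--         if a[i] == "(":
--
--             j = i+1
--             aux = 1
--             while j < len(a):
--                 if a[j] == "(":
--                     aux += 1
--                 if a[j] == ")":
--                     aux -= 1
--                 if aux == 0:
--                     aux = j
--                     j = len(a)
--
--                 j += 1
--
--             veriRepe(a[i:aux+1], sub)
--         i += 1
--
--     return(sub)
-- ===== SOURCE B (Python) =====
-- def veriSub(a):
--     n = len(a)
--     # one forward pass: match every '(' with its closing ')' via a stack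
--     match = {}
--     stack = []
--     for i, c in enumerate(a):
--         if c == "(":
--             stack.append(i)
--         elif c == ")" and stack:
--             match[stack.pop()] = i
--     # one pass collecting the tokens in order of their start position
--     toks = []
--     for i, c in enumerate(a):
--         if c.isalpha():
--             toks.append(c)
--         elif c == "-" and i + 1 < n:
--             nxt = a[i + 1]
--             if nxt.isalpha():
--                 toks.append(c + nxt)
--             elif nxt == "(" and i + 1 in match:
--                 toks.append(a[i:match[i + 1] + 1])
--         elif c == "(" and i in match:
--             toks.append(a[i:match[i] + 1])
--     return list(dict.fromkeys(toks))
-- ===== Notes on version B (the rewrite author's own statement) =====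
-- stated objective: faster
-- what changed: A rescans the rest of the string with a fresh counter loop for every opening parenthesis it meets; B matches all parentheses in one stack pass, then emits the tokens in a second pass and deduplicates once with dict.fromkeys.
-- intended difference: On strings with an unmatched opening parenthesis A appends the accidental slice a[i:aux+1], where aux is the leftover depth counter of its failed scan (often an empty or truncated fragment); B skips the unmatched group, which is the intended behaviour of a subexpression extractor. — e.g. on veriSub("(p"): A returns ["(p", "p"], B returns ["p"]
-- outside the precondition, e.g. on veriSub('-'): A raises IndexError, B returns []
import Mathlib
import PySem

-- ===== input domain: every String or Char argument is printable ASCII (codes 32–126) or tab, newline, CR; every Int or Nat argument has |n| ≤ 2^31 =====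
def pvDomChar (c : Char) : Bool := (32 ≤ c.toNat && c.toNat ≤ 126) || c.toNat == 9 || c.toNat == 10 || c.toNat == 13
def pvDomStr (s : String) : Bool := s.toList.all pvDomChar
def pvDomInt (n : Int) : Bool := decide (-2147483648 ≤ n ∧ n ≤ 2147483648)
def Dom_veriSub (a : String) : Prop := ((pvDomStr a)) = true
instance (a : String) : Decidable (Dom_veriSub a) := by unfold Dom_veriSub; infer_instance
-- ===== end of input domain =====

-- B replaces A's quadratic rescan for each '(' by one stack pass that matches all
-- parentheses, then one token pass and an ordered dedup (dict.fromkeys).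

-- ===== PORT A =====

-- veriRepe(a, sub): append a to sub unless already present
def pvAddA (sub : List String) (s : String) : List String :=
  if s ∈ sub then sub else sub ++ [s]

-- the inner `while j < len(a)` scan (duplicated twice in A's source); when the
-- counter aux hits 0 Python sets aux = j and exits the loop, so we return j there;
-- fuel bounds the iteration count (call sites pass fuel ≥ len(a) - j, enough)
def scanA (cs : List Char) (fuel : Nat) (j : Nat) (aux : Int) : Int :=
  match fuel with
  | 0 => aux
  | fuel + 1 =>
    if h : j < cs.length then
      let c := cs[j]
      let a1 := if c = '(' then aux + 1 else aux
      let a2 := if c = ')' then a1 - 1 else a1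
      if a2 = 0 then (j : Int) else scanA cs fuel (j + 1) a2
    else aux

-- the outer `while i < len(a)` loop; a[i+1] is read with a default (Pre_ puts the
-- only out-of-range read, a trailing '-', outside the claim)
def loopA (cs : List Char) (fuel : Nat) (i : Nat) (sub : List String) : List String :=
  match fuel with
  | 0 => sub
  | fuel + 1 =>
    if h : i < cs.length then
      let c := cs[i]
      let s1 := if PySem.Chars.isalpha c then pvAddA sub (String.ofList [c]) else sub
      let s2 := if c = '-' then
          let c1 := cs.getD (i + 1) ' '
          let s2a := if PySem.Chars.isalpha c1 then pvAddA s1 (String.ofList [c, c1]) else s1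
          if c1 = '(' then
            pvAddA s2a (String.ofList (PySem.List.slice cs (some (i : Int)) (some (scanA cs cs.length (i + 2) 1 + 1))))
          else s2a
        else s1
      let s3 := if c = '(' then
          pvAddA s2 (String.ofList (PySem.List.slice cs (some (i : Int)) (some (scanA cs cs.length (i + 1) 1 + 1))))
        else s2
      loopA cs fuel (i + 1) s3
    else sub

def veriSub (a : String) : List String := loopA a.toList a.toList.length 0 []

-- ===== PORT B =====

-- first pass of Source B: stack-match every '(' with its ')' (dict as assoc list)
def pvMatchGo (todo : List Char) (i : Nat) (stack : List Nat) (m : List (Nat × Nat)) : List (Nat × Nat) :=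
  match todo with
  | [] => m
  | c :: rest =>
    if c = '(' then pvMatchGo rest (i + 1) (i :: stack) m
    else if c = ')' then
      match stack with
      | [] => pvMatchGo rest (i + 1) [] m
      | p :: st => pvMatchGo rest (i + 1) st (m ++ [(p, i)])
    else pvMatchGo rest (i + 1) stack m

def pvMatch (cs : List Char) : List (Nat × Nat) := pvMatchGo cs 0 [] []

-- `i in match` / `match[i]` on the assoc list
def pvLookup (m : List (Nat × Nat)) (k : Nat) : Option Nat :=
  match m with
  | [] => none
  | (p, q) :: rest => if p = k then some q else pvLookup rest k

-- second pass of Source B: the tokens in order of their start position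
def pvToks (cs : List Char) (m : List (Nat × Nat)) (fuel : Nat) (i : Nat) : List String :=
  match fuel with
  | 0 => []
  | fuel + 1 =>
    if h : i < cs.length then
      let c := cs[i]
      if PySem.Chars.isalpha c then String.ofList [c] :: pvToks cs m fuel (i + 1)
      else if c = '-' then
        if h2 : i + 1 < cs.length then
          let nxt := cs[i + 1]
          if PySem.Chars.isalpha nxt then String.ofList [c, nxt] :: pvToks cs m fuel (i + 1)
          else if nxt = '(' then
            match pvLookup m (i + 1) with
            | some q => String.ofList (PySem.List.slice cs (some (i : Int)) (some ((q : Int) + 1))) :: pvToks cs m fuel (i + 1)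
            | none => pvToks cs m fuel (i + 1)
          else pvToks cs m fuel (i + 1)
        else pvToks cs m fuel (i + 1)
      else if c = '(' then
        match pvLookup m i with
        | some q => String.ofList (PySem.List.slice cs (some (i : Int)) (some ((q : Int) + 1))) :: pvToks cs m fuel (i + 1)
        | none => pvToks cs m fuel (i + 1)
      else pvToks cs m fuel (i + 1)
    else []

-- list(dict.fromkeys(toks)) = PySem.List.dedup
def veriSub_alt (a : String) : List String :=
  PySem.List.dedup (pvToks a.toList (pvMatch a.toList) a.toList.length 0)

-- ===== PRECONDITION & SPEC =====

-- Pre_ excludes exactly the strings ending in '-', where A's read of a[i+1] raises IndexError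
def Pre_veriSub (a : String) : Prop := a.toList.getLast? ≠ some '-'
instance (a : String) : Decidable (Pre_veriSub a) := by unfold Pre_veriSub; infer_instance
def pvWitness_veriSub : String := "-(p)"

-- helper for D_: the number of '(' left unmatched by a standard counter scan
def pvLeft (cs : List Char) : Nat :=
  cs.foldl (fun d c => if c = '(' then d + 1 else if c = ')' then d - 1 else d) 0

-- On inputs with an unmatched opening parenthesis A's inner scan never finds a close,
-- leaves the loop counter in aux, and appends the accidental slice a[i:aux+1]; B simply
-- skips the unmatched group, which is the intended reading (tokens are whole subexpressions).
def D_veriSub (a : String) : Prop := 0 < pvLeft a.toList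
instance (a : String) : Decidable (D_veriSub a) := by unfold D_veriSub; infer_instance

def Spec_veriSub (a : String) (out : List String) : Prop := ¬ D_veriSub a → out = veriSub_alt a
instance (a : String) (out : List String) : Decidable (Spec_veriSub a out) := by unfold Spec_veriSub; infer_instance

def pvDiffWitness_veriSub : String := "(p"
def pvDiffWitnessOut_veriSub : (List String) × (List String) := (["(p", "p"], ["p"])

-- ===== CLAIM (what is proved, stated in full; the proofs are below) =====
def Claim_unchanged_veriSub : Prop := ∀ (a : String), Dom_veriSub a → Pre_veriSub a → Spec_veriSub a (veriSub a)
def Claim_changed_veriSub : Prop := Dom_veriSub (pvDiffWitness_veriSub) ∧ Pre_veriSub (pvDiffWitness_veriSub) ∧ D_veriSub (pvDiffWitness_veriSub) ∧ veriSub (pvDiffWitness_veriSub) = pvDiffWitnessOut_veriSub.1 ∧ veriSub_alt (pvDiffWitness_veriSub) = pvDiffWitnessOut_veriSub.2 ∧ pvDiffWitnessOut_veriSub.1 ≠ pvDiffWitnessOut_veriSub.2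

-- ===== LEMMAS AND PROOFS =====

def pvStep (d : Nat) (c : Char) : Nat := if c = '(' then d + 1 else if c = ')' then d - 1 else d

def fcs : List Char → Nat → Option Nat
  | [], _ => none
  | c :: r, d =>
    if c = '(' then (fcs r (d + 1)).map (· + 1)
    else if c = ')' then (if d = 1 then some 0 else (fcs r (d - 1)).map (· + 1))
    else (fcs r d).map (· + 1)

def runp : List Char → Nat → Option Nat
  | [], d => some d
  | c :: r, d =>
    if c = '(' then runp r (d + 1)
    else if c = ')' then (if d = 1 then none else runp r (d - 1))
    else runp r d

def HStack (cs : List Char) (i : Nat) (stack : List Nat) : Prop :=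
  ∀ r (hr : r < stack.length), stack[r] < i ∧ cs[stack[r]]? = some '(' ∧
    runp ((cs.take i).drop (stack[r] + 1)) 1 = some (r + 1)

def HM (cs : List Char) (m : List (Nat × Nat)) : Prop :=
  ∀ p q, (p, q) ∈ m → ∃ t, fcs (cs.drop (p + 1)) 1 = some t ∧ q = p + 1 + t

def HC (cs : List Char) (i : Nat) (stack : List Nat) (m : List (Nat × Nat)) : Prop :=
  ∀ p, p < i → cs[p]? = some '(' → p ∈ stack ∨ ∃ q, (p, q) ∈ m

-- the take-(i+1) segment after a stack entry is the take-i segment plus cs[i]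


theorem runp_append (xs ys : List Char) : ∀ d, runp (xs ++ ys) d =
    match runp xs d with | some d' => runp ys d' | none => none := by
  induction xs with
  | nil => intro d; simp [runp]
  | cons c r ih =>
    intro d
    by_cases h1 : c = '('
    · simp [runp, h1, ih]
    · by_cases h2 : c = ')'
      · by_cases h3 : d = 1 <;> simp [runp, h1, h2, h3, ih]
      · simp [runp, h1, h2, ih]

theorem fcs_append_of_runp {xs : List Char} (ys : List Char) : ∀ {d d' : Nat},
    runp xs d = some d' →
    fcs (xs ++ ys) d = (fcs ys d').map (· + xs.length) := by
  induction xs with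
  | nil => intro d d' h; simp [runp] at h; subst h; simp
  | cons c r ih =>
    intro d d' h
    by_cases h1 : c = '('
    · rw [runp, if_pos h1] at h
      simp only [List.cons_append, fcs, if_pos h1, ih h, Option.map_map]
      exact congrFun (congrArg Option.map (by funext t; simp; omega)) _
    · by_cases h2 : c = ')'
      · by_cases h3 : d = 1
        · simp [runp, h1, h2, h3] at h
        · rw [runp, if_neg h1, if_pos h2, if_neg h3] at h
          simp only [List.cons_append, fcs, if_neg h1, if_pos h2, if_neg h3, ih h, Option.map_map]
          exact congrFun (congrArg Option.map (by funext t; simp; omega)) _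
      · rw [runp, if_neg h1, if_neg h2] at h
        simp only [List.cons_append, fcs, if_neg h1, if_neg h2, ih h, Option.map_map]
        exact congrFun (congrArg Option.map (by funext t; simp; omega)) _

theorem fcs_eq_none_of_runp {xs : List Char} : ∀ {d d' : Nat}, runp xs d = some d' →
    fcs xs d = none := by
  induction xs with
  | nil => intro d d' _; simp [fcs]
  | cons c r ih =>
    intro d d' h
    by_cases h1 : c = '('
    · rw [runp, if_pos h1] at h; simp [fcs, h1, ih h]
    · by_cases h2 : c = ')'
      · by_cases h3 : d = 1
        · simp [runp, h1, h2, h3] at h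
        · rw [runp, if_neg h1, if_pos h2, if_neg h3] at h
          simp [fcs, h1, h2, h3, ih h]
      · rw [runp, if_neg h1, if_neg h2] at h; simp [fcs, h1, h2, ih h]

theorem pos_aux : ∀ (xs : List Char) (d e : Nat), 1 ≤ d → d ≤ e → fcs xs d = none →
    0 < xs.foldl pvStep e := by
  intro xs
  induction xs with
  | nil => intro d e h1 h2 _; simpa [List.foldl] using by omega
  | cons c r ih =>
    intro d e h1 h2 hf
    by_cases hc1 : c = '('
    · rw [fcs, if_pos hc1] at hf
      simp only [Option.map_eq_none_iff] at hf
      simpa [List.foldl, pvStep, hc1] using ih (d+1) (e+1) (by omega) (by omega) hf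
    · by_cases hc2 : c = ')'
      · by_cases hd : d = 1
        · simp [fcs, hc1, hc2, hd] at hf
        · rw [fcs, if_neg hc1, if_pos hc2, if_neg hd] at hf
          simp only [Option.map_eq_none_iff] at hf
          simpa [List.foldl, pvStep, hc1, hc2] using ih (d-1) (e-1) (by omega) (by omega) hf
      · rw [fcs, if_neg hc1, if_neg hc2] at hf
        simp only [Option.map_eq_none_iff] at hf
        simpa [List.foldl, pvStep, hc1, hc2] using ih d e h1 h2 hf

theorem fcs_isSome_of_balanced {cs : List Char} (hL : pvLeft cs = 0)
    {i : Nat} (hi : i < cs.length) (hc : cs[i] = '(') :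
    ∃ t, fcs (cs.drop (i + 1)) 1 = some t := by
  rcases h : fcs (cs.drop (i + 1)) 1 with _ | t
  · exfalso
    have e0 : pvLeft cs = (cs.drop (i+1)).foldl pvStep ((cs.take i).foldl pvStep 0 + 1) := by
      have : cs = cs.take i ++ cs.drop i := (List.take_append_drop i cs).symm
      rw [pvLeft]
      conv_lhs => rw [this]
      rw [List.foldl_append, List.drop_eq_getElem_cons hi, hc]
      simp [List.foldl, pvStep]
      rfl
    have := pos_aux (cs.drop (i+1)) 1 ((cs.take i).foldl pvStep 0 + 1) (by omega) (by omega) h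
    omega
  · exact ⟨t, rfl⟩

theorem scanA_eq_of_fcs {cs : List Char} : ∀ (fuel j d t : Nat),
    cs.length - j ≤ fuel → 1 ≤ d → fcs (cs.drop j) d = some t →
    scanA cs fuel j (d : Int) = ((j + t : Nat) : Int) := by
  intro fuel
  induction fuel with
  | zero =>
    intro j d t hf _ hfcs
    have : cs.length ≤ j := by omega
    rw [List.drop_eq_nil_of_le this] at hfcs
    simp [fcs] at hfcs
  | succ fuel ih =>
    intro j d t hf hd hfcs
    by_cases hj : j < cs.length
    · rw [List.drop_eq_getElem_cons hj] at hfcs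
      rw [scanA]
      simp only [dif_pos hj]
      by_cases hc1 : cs[j] = '('
      · rw [fcs, if_pos hc1] at hfcs
        rcases Option.map_eq_some_iff.mp hfcs with ⟨t', ht', rfl⟩
        have hne : ¬ (cs[j] = ')') := by rw [hc1]; decide
        have hnz : (d : Int) + 1 ≠ 0 := by omega
        simp only [if_pos hc1, if_neg hne, if_neg hnz]
        have : ((d : Int) + 1) = ((d + 1 : Nat) : Int) := by push_cast; ring
        rw [this, ih (j+1) (d+1) t' (by omega) (by omega) ht']
        push_cast; ring
      · by_cases hc2 : cs[j] = ')'
        · by_cases hd1 : d = 1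
          · rw [fcs, if_neg hc1, if_pos hc2, if_pos hd1] at hfcs
            have : t = 0 := by simpa using hfcs.symm
            subst this hd1
            norm_num [if_neg hc1, if_pos hc2]
          · rw [fcs, if_neg hc1, if_pos hc2, if_neg hd1] at hfcs
            rcases Option.map_eq_some_iff.mp hfcs with ⟨t', ht', rfl⟩
            have hnz : (d : Int) - 1 ≠ 0 := by omega
            simp only [if_neg hc1, if_pos hc2, if_neg hnz]
            have : ((d : Int) - 1) = ((d - 1 : Nat) : Int) := by omega
            rw [this, ih (j+1) (d-1) t' (by omega) (by omega) ht']
            push_cast; ring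
        · rw [fcs, if_neg hc1, if_neg hc2] at hfcs
          rcases Option.map_eq_some_iff.mp hfcs with ⟨t', ht', rfl⟩
          have hnz : (d : Int) ≠ 0 := by omega
          simp only [if_neg hc1, if_neg hc2, if_neg hnz]
          rw [ih (j+1) d t' (by omega) (by omega) ht']
          push_cast; ring
    · rw [List.drop_eq_nil_of_le (by omega)] at hfcs
      simp [fcs] at hfcs

theorem pvLookup_mem {m : List (Nat × Nat)} {k q : Nat} (h : pvLookup m k = some q) :
    (k, q) ∈ m := by
  induction m with
  | nil => simp [pvLookup] at h
  | cons x rest ih =>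
    obtain ⟨p, v⟩ := x
    rw [pvLookup] at h
    by_cases hp : p = k
    · rw [if_pos hp] at h
      simp at h
      simp [hp, h]
    · rw [if_neg hp] at h
      exact List.mem_cons_of_mem _ (ih h)

theorem pvLookup_isSome_of_mem {m : List (Nat × Nat)} {k q : Nat} (h : (k, q) ∈ m) :
    ∃ q', pvLookup m k = some q' := by
  induction m with
  | nil => simp at h
  | cons x rest ih =>
    obtain ⟨p, v⟩ := x
    rw [pvLookup]
    by_cases hp : p = k
    · exact ⟨v, if_pos hp⟩
    · rw [if_neg hp]
      rcases List.mem_cons.mp h with he | hm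
      · exact absurd (congrArg Prod.fst he.symm) hp
      · exact ih hm

theorem foldl_pvAddA_eq_add (ts : List String) : ∀ (acc : List String),
    List.foldl pvAddA acc ts = List.foldl PySem.Set.add acc ts := by
  induction ts with
  | nil => intro acc; rfl
  | cons x r ih =>
    intro acc
    have : pvAddA acc x = PySem.Set.add acc x := by
      simp [pvAddA, PySem.Set.add, List.contains_iff_mem]
    simp [List.foldl, this, ih]

theorem foldl_pvAddA_eq_dedup (ts : List String) :
    List.foldl pvAddA [] ts = PySem.List.dedup ts := by
  rw [foldl_pvAddA_eq_add]; rfl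

theorem pvMatchGo_cons_open {c : Char} (rest : List Char) (i : Nat) (stack : List Nat)
    (m : List (Nat × Nat)) (h : c = '(') :
    pvMatchGo (c :: rest) i stack m = pvMatchGo rest (i + 1) (i :: stack) m := by
  subst h; rfl

theorem pvMatchGo_cons_close_nil {c : Char} (rest : List Char) (i : Nat)
    (m : List (Nat × Nat)) (h : c = ')') :
    pvMatchGo (c :: rest) i [] m = pvMatchGo rest (i + 1) [] m := by
  subst h; rfl

theorem pvMatchGo_cons_close_cons {c : Char} (rest : List Char) (i p : Nat) (st : List Nat)
    (m : List (Nat × Nat)) (h : c = ')') :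
    pvMatchGo (c :: rest) i (p :: st) m = pvMatchGo rest (i + 1) st (m ++ [(p, i)]) := by
  subst h; rfl

theorem pvMatchGo_cons_other {c : Char} (rest : List Char) (i : Nat) (stack : List Nat)
    (m : List (Nat × Nat)) (h1 : c ≠ '(') (h2 : c ≠ ')') :
    pvMatchGo (c :: rest) i stack m = pvMatchGo rest (i + 1) stack m := by
  conv_lhs => rw [pvMatchGo.eq_def]
  simp only [if_neg h1, if_neg h2]

theorem seg_succ {cs : List Char} {i p : Nat} (hi : i < cs.length) (hp : p + 1 ≤ i) :
    (cs.take (i+1)).drop (p+1) = (cs.take i).drop (p+1) ++ [cs[i]] := by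
  rw [List.take_succ, List.getElem?_eq_getElem hi]
  simp only [Option.toList_some]
  rw [List.drop_append_of_le_length (by simpa using by omega)]

theorem pvMatchGo_inv (cs : List Char) : ∀ (todo : List Char) (i : Nat) (stack : List Nat)
    (m : List (Nat × Nat)), todo = cs.drop i → i ≤ cs.length →
    HStack cs i stack → HM cs m → HC cs i stack m →
    ∃ st', HStack cs cs.length st' ∧ HM cs (pvMatchGo todo i stack m) ∧
      HC cs cs.length st' (pvMatchGo todo i stack m) := by
  intro todo
  induction todo with
  | nil =>
    intro i stack m ht hi hs hm hc
    have : cs.length ≤ i := by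
      by_contra hlt
      push_neg at hlt
      rw [List.drop_eq_getElem_cons hlt] at ht
      exact List.cons_ne_nil _ _ ht.symm
    have hieq : i = cs.length := by omega
    subst hieq
    exact ⟨stack, hs, hm, hc⟩
  | cons c rest ih =>
    intro i stack m ht hi hs hm hc
    have hlt : i < cs.length := by
      by_contra h
      rw [List.drop_eq_nil_of_le (by omega)] at ht
      exact List.cons_ne_nil _ _ ht
    have hdrop := List.drop_eq_getElem_cons hlt (l := cs)
    rw [hdrop] at ht
    obtain ⟨hceq, hrest⟩ : c = cs[i] ∧ rest = cs.drop (i+1) := by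
      constructor <;> [exact (List.cons.injEq .. ▸ ht).1; exact (List.cons.injEq .. ▸ ht).2]
    by_cases h1 : c = '('
    · rw [pvMatchGo_cons_open rest i stack m h1]
      apply ih (i+1) (i :: stack) m hrest (by omega)
      · -- HStack
        intro r hr
        match r with
        | 0 =>
          simp only [List.getElem_cons_zero]
          refine ⟨by omega, by rw [List.getElem?_eq_getElem hlt, ← hceq, h1], ?_⟩
          rw [List.drop_eq_nil_of_le (by simpa using by omega)]
          rfl
        | r + 1 =>
          simp only [List.length_cons] at hr
          obtain ⟨ha, hb, hrun⟩ := hs r (by omega)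
          refine ⟨by simpa using by omega, by simpa using hb, ?_⟩
          simp only [List.getElem_cons_succ]
          rw [seg_succ hlt (by omega), runp_append, hrun, ← hceq, h1]
          simp [runp]
      · exact hm
      · -- HC
        intro p hp hop
        by_cases hpi : p = i
        · exact Or.inl (by simp [hpi])
        · rcases hc p (by omega) hop with hin | hq
          · exact Or.inl (List.mem_cons_of_mem _ hin)
          · exact Or.inr hq
    · by_cases h2 : c = ')'
      · rcases stack with _ | ⟨p, st⟩
        · rw [pvMatchGo_cons_close_nil rest i m h2]
          apply ih (i+1) [] m hrest (by omega)
          · intro r hr; simp at hr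
          · exact hm
          · intro p hp hop
            by_cases hpi : p = i
            · exfalso
              rw [hpi, List.getElem?_eq_getElem hlt, ← hceq, h2] at hop
              simp at hop
            · rcases hc p (by omega) hop with hin | hq
              · simp at hin
              · exact Or.inr hq
        · rw [pvMatchGo_cons_close_cons rest i p st m h2]
          obtain ⟨hpa, hpb, hprun⟩ := hs 0 (by simp)
          simp only [List.getElem_cons_zero] at hpa hpb hprun
          apply ih (i+1) st (m ++ [(p, i)]) hrest (by omega)
          · intro r hr
            obtain ⟨ha, hb, hrun⟩ := hs (r+1) (by simpa using by omega)
            simp only [List.getElem_cons_succ] at ha hb hrun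
            refine ⟨by omega, hb, ?_⟩
            rw [seg_succ hlt (by omega), runp_append, hrun, ← hceq, h2]
            simp [runp]
          · -- HM with the new pair
            intro p' q' hmem
            rcases List.mem_append.mp hmem with hold | hnew
            · exact hm p' q' hold
            · simp only [List.mem_singleton, Prod.mk.injEq] at hnew
              obtain ⟨rfl, rfl⟩ := hnew
              refine ⟨q' - (p' + 1), ?_, by omega⟩
              have hsplit : cs.drop (p'+1) = (cs.take q').drop (p'+1) ++ cs.drop q' := by
                conv_lhs => rw [← List.take_append_drop q' cs]
                rw [List.drop_append_of_le_length (by simpa using by omega)]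
              rw [hsplit, fcs_append_of_runp _ hprun, hdrop, ← hceq, h2]
              rw [fcs]
              simp [List.length_drop]
              omega
          · intro p' hp' hop
            by_cases hpi : p' = i
            · exfalso
              rw [hpi, List.getElem?_eq_getElem hlt, ← hceq, h2] at hop
              simp at hop
            · rcases hc p' (by omega) hop with hin | hq
              · rcases List.mem_cons.mp hin with rfl | hst
                · exact Or.inr ⟨i, by simp⟩
                · exact Or.inl hst
              · rcases hq with ⟨q, hq⟩
                exact Or.inr ⟨q, List.mem_append_left _ hq⟩
      · rw [pvMatchGo_cons_other rest i stack m h1 h2]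
        apply ih (i+1) stack m hrest (by omega)
        · intro r hr
          obtain ⟨ha, hb, hrun⟩ := hs r hr
          refine ⟨by omega, hb, ?_⟩
          rw [seg_succ hlt (by omega), runp_append, hrun, ← hceq]
          simp [runp, h1, h2]
        · exact hm
        · intro p hp hop
          by_cases hpi : p = i
          · exfalso
            rw [hpi, List.getElem?_eq_getElem hlt, ← hceq] at hop
            simp at hop
            exact h1 hop
          · exact hc p (by omega) hop

theorem pvMatch_spec {cs : List Char} (hL : pvLeft cs = 0) {i : Nat}
    (hi : i < cs.length) (hc : cs[i] = '(') :
    ∃ t, fcs (cs.drop (i + 1)) 1 = some t ∧ pvLookup (pvMatch cs) i = some (i + 1 + t) := by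
  obtain ⟨st', hs', hm', hc'⟩ := pvMatchGo_inv cs cs 0 [] []
    (List.drop_zero (l := cs)).symm (by omega)
    (by intro r hr; simp at hr)
    (by intro p q h; simp at h)
    (by intro p hp; omega)
  have hst : st' = [] := by
    rcases st' with _ | ⟨p, st⟩
    · rfl
    · exfalso
      obtain ⟨hpa, hpb, hprun⟩ := hs' 0 (by simp)
      simp only [List.getElem_cons_zero, List.take_length] at hpa hpb hprun
      obtain ⟨hplt, hpeq⟩ := List.getElem?_eq_some_iff.mp hpb
      obtain ⟨t, hft⟩ := fcs_isSome_of_balanced hL hplt hpeq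
      rw [fcs_eq_none_of_runp hprun] at hft
      simp at hft
  subst hst
  obtain ⟨t, hft⟩ := fcs_isSome_of_balanced hL hi hc
  refine ⟨t, hft, ?_⟩
  rcases hc' i hi (List.getElem?_eq_some_iff.mpr ⟨hi, hc⟩) with hin | ⟨q, hq⟩
  · simp at hin
  · obtain ⟨q', hq'⟩ := pvLookup_isSome_of_mem hq
    obtain ⟨t', hft', rfl⟩ := hm' _ _ (pvLookup_mem hq')
    rw [hft] at hft'
    obtain rfl : t = t' := by simpa using hft'
    exact hq'

theorem isalpha_not_special {c : Char} (h : PySem.Chars.isalpha c = true) :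
    c ≠ '-' ∧ c ≠ '(' ∧ c ≠ ')' := by
  refine ⟨?_, ?_, ?_⟩ <;> rintro rfl <;> exact absurd h (by decide)

theorem loopA_eq_foldl (cs : List Char) (hPre : cs.getLast? ≠ some '-')
    (hm : ∀ (i : Nat) (hi : i < cs.length), cs[i] = '(' →
      ∃ t, fcs (cs.drop (i + 1)) 1 = some t ∧ pvLookup (pvMatch cs) i = some (i + 1 + t)) :
    ∀ (fuel i : Nat) (sub : List String), cs.length - i ≤ fuel →
      loopA cs fuel i sub = List.foldl pvAddA sub (pvToks cs (pvMatch cs) fuel i) := by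
  intro fuel
  induction fuel with
  | zero => intro i sub _; rfl
  | succ fuel ih =>
    intro i sub hfu
    by_cases hi : i < cs.length
    · rw [loopA, pvToks]
      simp only [dif_pos hi]
      by_cases ha : PySem.Chars.isalpha cs[i]
      · obtain ⟨hn1, hn2, _⟩ := isalpha_not_special ha
        simp only [if_pos ha, if_neg hn1, if_neg hn2]
        rw [List.foldl_cons]
        exact ih (i+1) _ (by omega)
      · simp only [if_neg ha]
        by_cases hminus : cs[i] = '-'
        · have h2 : i + 1 < cs.length := by
            by_contra hle
            have : i = cs.length - 1 := by omega
            apply hPre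
            rw [List.getLast?_eq_getElem?, show cs.length - 1 = i from by omega,
              List.getElem?_eq_getElem hi, hminus]
          have hno : ¬ (cs[i] = '(') := by rw [hminus]; decide
          have hgetD : cs.getD (i+1) ' ' = cs[i+1] := List.getD_eq_getElem cs ' ' h2
          simp only [if_pos hminus, dif_pos h2, if_neg hno, hgetD]
          by_cases hna : PySem.Chars.isalpha cs[i+1]
          · obtain ⟨_, hn2, _⟩ := isalpha_not_special hna
            simp only [if_pos hna, if_neg hn2]
            rw [List.foldl_cons]
            exact ih (i+1) _ (by omega)
          · simp only [if_neg hna]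
            by_cases hnp : cs[i+1] = '('
            · obtain ⟨t, hft, hlook⟩ := hm (i+1) h2 hnp
              have hscan : scanA cs cs.length (i+2) 1 = ((i + 2 + t : Nat) : Int) := by
                have := scanA_eq_of_fcs cs.length (i+2) 1 t (by omega) (by omega) hft
                simpa using this
              simp only [if_pos hnp, hlook, hscan]
              rw [List.foldl_cons]
              have hcast : ((i + 2 + t : Nat) : Int) + 1 = ((i + 1 + t : Nat) : Int) + 1 + 1 := by
                push_cast; ring
              rw [hcast]
              exact ih (i+1) _ (by omega)
            · simp only [if_neg hnp]
              exact ih (i+1) _ (by omega)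
        · simp only [if_neg hminus]
          by_cases hop : cs[i] = '('
          · obtain ⟨t, hft, hlook⟩ := hm i hi hop
            have hscan : scanA cs cs.length (i+1) 1 = ((i + 1 + t : Nat) : Int) := by
              have := scanA_eq_of_fcs cs.length (i+1) 1 t (by omega) (by omega) hft
              simpa using this
            simp only [if_pos hop, hlook, hscan]
            rw [List.foldl_cons]
            exact ih (i+1) _ (by omega)
          · simp only [if_neg hop]
            exact ih (i+1) _ (by omega)
    · rw [loopA, pvToks]
      simp [dif_neg hi]

-- ===== VERDICT (by name: the statement is the Claim_ definition above) =====
theorem veriSub_spec : Claim_unchanged_veriSub := by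
  unfold Claim_unchanged_veriSub
  intro a _ hPre
  unfold Spec_veriSub
  intro hD
  unfold veriSub veriSub_alt
  have hL : pvLeft a.toList = 0 := by
    unfold D_veriSub at hD; omega
  have hm : ∀ (i : Nat) (hi : i < a.toList.length), a.toList[i] = '(' →
      ∃ t, fcs (a.toList.drop (i + 1)) 1 = some t ∧
        pvLookup (pvMatch a.toList) i = some (i + 1 + t) :=
    fun i hi hc => pvMatch_spec hL hi hc
  rw [loopA_eq_foldl a.toList hPre hm a.toList.length 0 [] (by omega)]
  exact foldl_pvAddA_eq_dedup _

theorem veriSub_changed : Claim_changed_veriSub := by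
  unfold Claim_changed_veriSub; decide
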